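-- pv_equiv track=rewrite | github.com/eshangulati/Assignment2-Intro-to-Artificial-Intelligence | truth_table_check.py | truth_table_check
-- ===== SOURCE A (Python) =====
-- import itertools
--
-- def parse_clauses(kb):
--     symbols = set()
--     processed_clauses = []
--     for clause in kb:
--         if '=>' in clause:
--             premises, conclusion = clause.split('=>')
--             premises = premises.strip().split('&')
--             for premise in premises:
--                 symbols.add(premise.strip())
--             symbols.add(conclusion.strip())
--             processed_clauses.append((premises, conclusion.strip()))
--         else:
--             symbols.add(clause.strip())
--             processed_clauses.append(([], clause.strip()))  # Treat as fact
--     return processed_clauses, list(symbols)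
--
-- def evaluate(processed_clauses, assignment):
--     for premises, conclusion in processed_clauses:
--         if premises:  # There are premises leading to a conclusion
--             if all(assignment.get(premise.strip(), False) for premise in premises):
--                 if not assignment.get(conclusion, False):
--                     return False
--         else:  # It's a fact
--             if not assignment.get(conclusion, False):
--                 return False
--     return True
--
-- def truth_table_check(kb, query):
--     processed_clauses, symbols = parse_clauses(kb)
--     valid_models = []
--     all_valid_models_satisfy_query = True
--
--     for values in itertools.product([True, False], repeat=len(symbols)):
--         assignment = dict(zip(symbols, values))
--         if evaluate(processed_clauses, assignment):
--             valid_models.append(assignment)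
--             # Check if the query is false in any valid model
--             if not assignment.get(query, False):
--                 all_valid_models_satisfy_query = False
--
--     return f"YES: {len(valid_models)}" if all_valid_models_satisfy_query and valid_models else "NO"
-- ===== SOURCE B (Python) =====
-- def truth_table_check(kb, query):
--     # Parse: same clause/symbol extraction as a truth-table checker needs
--     # (premises stored already stripped; symbols kept as first-seen ordered list).
--     symbols = []
--     seen = set()
--     clauses = []
--     for clause in kb:
--         if '=>' in clause:
--             left, right = clause.split('=>')
--             premises = [p.strip() for p in left.strip().split('&')]
--             conclusion = right.strip()
--         else:
--             premises = []
--             conclusion = clause.strip()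
--         clauses.append((premises, conclusion))
--         for s in premises + [conclusion]:
--             if s not in seen:
--                 seen.add(s)
--                 symbols.append(s)
--
--     def violated(assignment):
--         # a clause is definitively violated once its conclusion is assigned False
--         # and every premise is assigned True (facts: empty premises)
--         for premises, conclusion in clauses:
--             if assignment.get(conclusion) is False and all(assignment.get(p) is True for p in premises):
--                 return True
--         return False
--
--     def dfs(i, assignment):
--         if violated(assignment):
--             return 0, True
--         if i == len(symbols):
--             return 1, assignment.get(query, False)
--         total, all_sat = 0, True
--         for value in (True, False):
--             assignment[symbols[i]] = value
--             c, s = dfs(i + 1, assignment)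
--             total += c
--             all_sat = all_sat and s
--         del assignment[symbols[i]]
--         return total, all_sat
--
--     count, all_sat = dfs(0, {})
--     return f"YES: {count}" if count > 0 and all_sat else "NO"
-- ===== Notes on version B (the rewrite author's own statement) =====
-- stated objective: faster
-- what changed: Replaces A's exhaustive itertools.product enumeration of all 2^n truth assignments by a recursive backtracking DFS over the symbol list that prunes a branch as soon as some clause is definitively violated (all premises assigned True, conclusion assigned False) by the partial assignment, counting models and AND-ing the query value only at complete assignments.
import Mathlib
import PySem

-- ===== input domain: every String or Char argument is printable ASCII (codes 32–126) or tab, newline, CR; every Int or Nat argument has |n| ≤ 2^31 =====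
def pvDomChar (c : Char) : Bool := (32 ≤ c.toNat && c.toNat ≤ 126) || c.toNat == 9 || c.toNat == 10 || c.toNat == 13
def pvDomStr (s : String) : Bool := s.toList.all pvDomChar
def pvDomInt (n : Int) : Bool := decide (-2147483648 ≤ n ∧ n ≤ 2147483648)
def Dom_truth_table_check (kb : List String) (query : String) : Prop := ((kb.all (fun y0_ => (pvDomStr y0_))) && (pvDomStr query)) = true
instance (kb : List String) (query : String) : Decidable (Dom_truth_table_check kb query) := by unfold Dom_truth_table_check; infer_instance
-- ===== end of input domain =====

-- B replaces A's exhaustive itertools.product enumeration by a backtracking DFS over the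
-- symbols that prunes a branch once some clause is definitively violated by the partial
-- assignment; proved equal to A on every input where A returns (Pre_ excludes clauses
-- containing '=>' twice or more, on which both Pythons raise ValueError).

-- ===== PORT A =====
def pvStepA (st : PySem.Set String × List (List String × String)) (clause : String) :
    PySem.Set String × List (List String × String) :=
  if PySem.Str.isIn "=>" clause then
    match PySem.Str.split? clause "=>" with
    | some [prem, concl] =>
      let premises := (PySem.Str.split? (PySem.Str.strip prem) "&").getD []
      let syms := premises.foldl (fun s p => PySem.Set.add s (PySem.Str.strip p)) st.1
      (PySem.Set.add syms (PySem.Str.strip concl), st.2 ++ [(premises, PySem.Str.strip concl)])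
    | _ => st
  else
    (PySem.Set.add st.1 (PySem.Str.strip clause), st.2 ++ [([], PySem.Str.strip clause)])

def pvParseA (kb : List String) : List (List String × String) × List String :=
  let st := kb.foldl pvStepA (PySem.Set.empty, [])
  (st.2, st.1)

def pvEvalA (a : PySem.Dict String Bool) : List (List String × String) → Bool
  | [] => true
  | (premises, conclusion) :: rest =>
    if !premises.isEmpty then
      if premises.all (fun p => a.getD (PySem.Str.strip p) false) then
        if !(a.getD conclusion false) then false else pvEvalA a rest
      else pvEvalA a rest
    else
      if !(a.getD conclusion false) then false else pvEvalA a rest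

def pvProduct : Nat → List (List Bool)
  | 0 => [[]]
  | n + 1 => [true, false].flatMap (fun b => (pvProduct n).map (b :: ·))

def pvLoopA (clauses : List (List String × String)) (symbols : List String) (query : String)
    (st : List (PySem.Dict String Bool) × Bool) (values : List Bool) :
    List (PySem.Dict String Bool) × Bool :=
  let assignment := PySem.Dict.ofList (symbols.zip values)
  if pvEvalA assignment clauses then
    (st.1 ++ [assignment], if !(assignment.getD query false) then false else st.2)
  else st

def truth_table_check (kb : List String) (query : String) : String :=
  let pc := pvParseA kb
  let st := (pvProduct pc.2.length).foldl (pvLoopA pc.1 pc.2 query) ([], true)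
  if st.2 && !st.1.isEmpty then "YES: " ++ PySem.Int.toStr st.1.length else "NO"

-- ===== PORT B =====
def pvStepB (st : PySem.Set String × List (List String × String)) (clause : String) :
    PySem.Set String × List (List String × String) :=
  if PySem.Str.isIn "=>" clause then
    match PySem.Str.split? clause "=>" with
    | some [l, r] =>
      let premises := ((PySem.Str.split? (PySem.Str.strip l) "&").getD []).map (fun p => PySem.Str.strip p)
      let conclusion := PySem.Str.strip r
      (PySem.Set.update st.1 (premises ++ [conclusion]), st.2 ++ [(premises, conclusion)])
    | _ => st
  else
    let conclusion := PySem.Str.strip clause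
    (PySem.Set.update st.1 ([] ++ [conclusion]), st.2 ++ [([], conclusion)])

def pvViolated (clauses : List (List String × String)) (a : PySem.Dict String Bool) : Bool :=
  clauses.any (fun pc => a.get? pc.2 == some false && pc.1.all (fun p => a.get? p == some true))

def pvDfs (clauses : List (List String × String)) (query : String) :
    List String → PySem.Dict String Bool → Nat × Bool
  | [], a => if pvViolated clauses a then (0, true) else (1, a.getD query false)
  | s :: rest, a =>
    if pvViolated clauses a then (0, true)
    else
      let r1 := pvDfs clauses query rest (a.insert s true)
      let r2 := pvDfs clauses query rest (a.insert s false)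
      (r1.1 + r2.1, r1.2 && r2.2)

def truth_table_check_alt (kb : List String) (query : String) : String :=
  let st := kb.foldl pvStepB (PySem.Set.empty, [])
  let r := pvDfs st.2 query st.1 PySem.Dict.empty
  if r.1 > 0 && r.2 then "YES: " ++ PySem.Int.toStr r.1 else "NO"

-- ===== PRECONDITION & SPEC =====
-- Pre_ excludes kb lists containing a clause with two or more '=>' substrings: there
-- clause.split('=>') has more than 2 parts and BOTH A and B raise ValueError.
def Pre_truth_table_check (kb : List String) (query : String) : Prop :=
  ∀ clause ∈ kb, PySem.Str.count clause "=>" ≤ 1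
instance (kb : List String) (query : String) : Decidable (Pre_truth_table_check kb query) := by
  unfold Pre_truth_table_check; infer_instance

def pvWitness_truth_table_check : List String × String := (["p => q", "p"], "q")

def Spec_truth_table_check (kb : List String) (query : String) (out : String) : Prop := out = truth_table_check_alt kb query
instance (kb : List String) (query : String) (out : String) : Decidable (Spec_truth_table_check kb query out) := by unfold Spec_truth_table_check; infer_instance

-- ===== CLAIM (what is proved, stated in full; the proofs are below) =====
def Claim_equal_truth_table_check : Prop := ∀ (kb : List String) (query : String), Dom_truth_table_check kb query → Pre_truth_table_check kb query → Spec_truth_table_check kb query (truth_table_check kb query)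

-- ===== LEMMAS AND PROOFS =====

def pvNorm (pc : List String × String) : List String × String :=
  (pc.1.map (fun p => PySem.Str.strip p), pc.2)

theorem pv_step_rel (sy : PySem.Set String) (cl : List (List String × String)) (clause : String) :
    pvStepB (sy, cl.map pvNorm) clause =
      ((pvStepA (sy, cl) clause).1, (pvStepA (sy, cl) clause).2.map pvNorm) := by
  by_cases hin : PySem.Str.isIn "=>" clause = true
  · rcases hsp : PySem.Str.split? clause "=>" with _ | ⟨_ | ⟨x, _ | ⟨y, _ | ⟨z, rest⟩⟩⟩⟩ <;>
      simp only [pvStepA, pvStepB, hin, if_true, hsp]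
    rw [PySem.Set.update_append, PySem.Set.update_cons, PySem.Set.update_nil,
        PySem.Set.update_map_eq_foldl_add]
    simp [pvNorm]
  · simp only [pvStepA, pvStepB, Bool.not_eq_true] at hin ⊢
    simp only [hin, Bool.false_eq_true, if_false]
    rw [List.nil_append, PySem.Set.update_cons, PySem.Set.update_nil]
    simp [pvNorm]

theorem pv_parse_rel (kb : List String) : ∀ (sy : PySem.Set String) (cl : List (List String × String)),
    kb.foldl pvStepB (sy, cl.map pvNorm) =
      ((kb.foldl pvStepA (sy, cl)).1, (kb.foldl pvStepA (sy, cl)).2.map pvNorm) := by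
  induction kb with
  | nil => intro sy cl; rfl
  | cons c t ih =>
    intro sy cl
    simp only [List.foldl_cons, pv_step_rel]
    exact ih (pvStepA (sy, cl) c).1 (pvStepA (sy, cl) c).2

def pvCovered (sy : PySem.Set String) (cl : List (List String × String)) : Prop :=
  ∀ pc ∈ cl, pc.2 ∈ sy ∧ ∀ p ∈ pc.1, p ∈ sy

set_option maxHeartbeats 1000000 in
theorem pv_step_cover (st : PySem.Set String × List (List String × String)) (clause : String)
    (h : pvCovered st.1 st.2) :
    pvCovered (pvStepB st clause).1 (pvStepB st clause).2 := by
  obtain ⟨sy, cl⟩ := st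
  unfold pvCovered pvStepB
  by_cases hin : PySem.Str.isIn "=>" clause = true
  · rcases hsp : PySem.Str.split? clause "=>" with _ | ⟨_ | ⟨x, _ | ⟨y, _ | ⟨z, rest⟩⟩⟩⟩ <;>
      simp only [hin, if_true] <;> try exact h
    generalize ((PySem.Str.split? (PySem.Str.strip x) "&").getD []).map (fun p => PySem.Str.strip p) = ps
    generalize PySem.Str.strip y = cc
    intro pc hpc
    rcases List.mem_append.mp hpc with hpc | hpc
    · obtain ⟨h1, h2⟩ := h pc hpc
      exact ⟨(PySem.Set.mem_update _ _ _).mpr (Or.inl h1),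
        fun p hp => (PySem.Set.mem_update _ _ _).mpr (Or.inl (h2 p hp))⟩
    · simp only [List.mem_singleton] at hpc
      subst hpc
      refine ⟨(PySem.Set.mem_update _ _ _).mpr (Or.inr (by simp)), fun p hp => ?_⟩
      exact (PySem.Set.mem_update _ _ _).mpr (Or.inr (List.mem_append.mpr (Or.inl hp)))
  · simp only [Bool.not_eq_true] at hin
    simp only [hin, Bool.false_eq_true, if_false]
    generalize PySem.Str.strip clause = cc
    intro pc hpc
    rcases List.mem_append.mp hpc with hpc | hpc
    · obtain ⟨h1, h2⟩ := h pc hpc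
      exact ⟨(PySem.Set.mem_update _ _ _).mpr (Or.inl h1),
        fun p hp => (PySem.Set.mem_update _ _ _).mpr (Or.inl (h2 p hp))⟩
    · simp only [List.mem_singleton] at hpc
      subst hpc
      exact ⟨(PySem.Set.mem_update _ _ _).mpr (Or.inr (by simp)), fun p hp => by simp at hp⟩

set_option maxHeartbeats 1000000 in
theorem pv_parse_cover (kb : List String) : ∀ (st : PySem.Set String × List (List String × String)),
    pvCovered st.1 st.2 → pvCovered (kb.foldl pvStepB st).1 (kb.foldl pvStepB st).2 := by
  induction kb with
  | nil => intro st h; exact h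
  | cons c t ih =>
    intro st h
    simp only [List.foldl_cons]
    exact ih (pvStepB st c) (pv_step_cover st c h)

set_option maxHeartbeats 1000000 in
theorem pv_step_nodup (st : PySem.Set String × List (List String × String)) (clause : String)
    (h : st.1.Nodup) : (pvStepB st clause).1.Nodup := by
  obtain ⟨sy, cl⟩ := st
  unfold pvStepB
  by_cases hin : PySem.Str.isIn "=>" clause = true
  · rcases hsp : PySem.Str.split? clause "=>" with _ | ⟨_ | ⟨x, _ | ⟨y, _ | ⟨z, rest⟩⟩⟩⟩ <;>
      simp only [hin, if_true] <;> first
        | exact PySem.Set.nodup_update _ _ h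
        | exact h
  · simp only [Bool.not_eq_true] at hin
    simp only [hin, Bool.false_eq_true, if_false]
    exact PySem.Set.nodup_update _ _ h

set_option maxHeartbeats 1000000 in
theorem pv_parse_nodup (kb : List String) : ∀ (st : PySem.Set String × List (List String × String)),
    st.1.Nodup → (kb.foldl pvStepB st).1.Nodup := by
  induction kb with
  | nil => intro st h; exact h
  | cons c t ih =>
    intro st h
    simp only [List.foldl_cons]
    exact ih (pvStepB st c) (pv_step_nodup st c h)

def pvOk (a : PySem.Dict String Bool) (pc : List String × String) : Bool :=
  !(pc.1.all (fun p => a.getD p false)) || a.getD pc.2 false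

theorem pv_evalA_eq (a : PySem.Dict String Bool) : ∀ cl : List (List String × String),
    pvEvalA a cl = (cl.map pvNorm).all (pvOk a) := by
  intro cl
  induction cl with
  | nil => rfl
  | cons pc rest ih =>
    obtain ⟨ps, c⟩ := pc
    have hstep : (List.map pvNorm ((ps, c) :: rest)).all (pvOk a)
        = (pvOk a (pvNorm (ps, c)) && (List.map pvNorm rest).all (pvOk a)) := by simp
    rw [hstep, ← ih]
    have hall : ((ps.map (fun p => PySem.Str.strip p)).all (fun p => a.getD p false))
        = ps.all (fun p => a.getD (PySem.Str.strip p) false) := by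
      simp only [List.all_map]; rfl
    cases ps with
    | nil =>
      cases h2 : a.getD c false <;> simp [pvEvalA, pvNorm, pvOk, h2]
    | cons p pt =>
      simp only [pvNorm, pvOk, hall]
      simp only [pvEvalA, List.isEmpty_cons, Bool.not_false, if_true]
      cases h1 : (p :: pt).all (fun p => a.getD (PySem.Str.strip p) false) <;>
        cases h2 : a.getD c false <;> simp [h1, h2]

def pvExt (a m : PySem.Dict String Bool) : Prop :=
  ∀ (k : String) (v : Bool), a.get? k = some v → m.get? k = some v

theorem pv_violated_mono (cl : List (List String × String)) (a m : PySem.Dict String Bool)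
    (h : pvViolated cl a = true) (hx : pvExt a m) : pvViolated cl m = true := by
  simp only [pvViolated, List.any_eq_true, Bool.and_eq_true, beq_iff_eq, List.all_eq_true] at h ⊢
  obtain ⟨pc, hmem, hc, hp⟩ := h
  exact ⟨pc, hmem, hx _ _ hc, fun p hpm => hx _ _ (hp p hpm)⟩

theorem pv_violated_eval (cl : List (List String × String)) (a : PySem.Dict String Bool)
    (h : pvViolated cl a = true) : cl.all (pvOk a) = false := by
  simp only [pvViolated, List.any_eq_true, Bool.and_eq_true, beq_iff_eq, List.all_eq_true] at h
  obtain ⟨pc, hmem, hc, hp⟩ := h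
  simp only [List.all_eq_false]
  refine ⟨pc, hmem, ?_⟩
  have hgc : a.getD pc.2 false = false := PySem.Dict.getD_of_get?_eq_some _ false hc
  have hgp : pc.1.all (fun p => a.getD p false) = true := by
    simp only [List.all_eq_true]
    intro p hpm
    exact PySem.Dict.getD_of_get?_eq_some _ false (hp p hpm)
  simp [pvOk, hgc, hgp]

theorem pv_leaf_eval (cl : List (List String × String)) (a : PySem.Dict String Bool)
    (hc : ∀ pc ∈ cl, (a.get? pc.2).isSome ∧ ∀ p ∈ pc.1, (a.get? p).isSome)
    (h : pvViolated cl a = false) : cl.all (pvOk a) = true := by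
  simp only [pvViolated, List.any_eq_false] at h
  simp only [List.all_eq_true]
  intro pc hmem
  obtain ⟨hcs, hps⟩ := hc pc hmem
  obtain ⟨bc, hbc⟩ := Option.isSome_iff_exists.mp hcs
  cases bc with
  | true => simp [pvOk, PySem.Dict.getD_of_get?_eq_some _ false hbc]
  | false =>
    have := h pc hmem
    simp only [Bool.and_eq_true, beq_iff_eq, not_and_or] at this
    rcases this with hne | hall
    · exact absurd hbc hne
    · simp only [List.all_eq_true, beq_iff_eq, not_forall] at hall
      obtain ⟨p, hpm, hpne⟩ := hall
      obtain ⟨bp, hbp⟩ := Option.isSome_iff_exists.mp (hps p hpm)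
      have hbpf : bp = false := by
        cases bp
        · rfl
        · exact absurd (by simp [hbp]) hpne
      subst hbpf
      have : pc.1.all (fun p => a.getD p false) = false := by
        simp only [List.all_eq_false]
        exact ⟨p, hpm, by simp [PySem.Dict.getD_of_get?_eq_some _ false hbp]⟩
      simp [pvOk, this]

def pvModels : List String → PySem.Dict String Bool → List (PySem.Dict String Bool)
  | [], a => [a]
  | s :: r, a => pvModels r (a.insert s true) ++ pvModels r (a.insert s false)

theorem pv_ext_models : ∀ (syms : List String) (a m : PySem.Dict String Bool),
    syms.Nodup → (∀ s ∈ syms, a.get? s = none) → m ∈ pvModels syms a → pvExt a m := by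
  intro syms
  induction syms with
  | nil =>
    intro a m _ _ hm
    simp [pvModels] at hm
    subst hm; exact fun k v h => h
  | cons s r ih =>
    intro a m hnd hnone hm
    have hnd' := (List.nodup_cons.mp hnd).2
    have hsn := hnone s (List.mem_cons_self ..)
    have step : ∀ b : Bool, pvExt a (a.insert s b) := by
      intro b k v hkv
      have hks : k ≠ s := fun he => by rw [he, hsn] at hkv; simp at hkv
      rw [PySem.Dict.get?_insert_of_ne _ _ hks]
      exact hkv
    have hnone' : ∀ b : Bool, ∀ s' ∈ r, (a.insert s b).get? s' = none := by
      intro b s' hs'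
      have hne : s' ≠ s := fun he => (List.nodup_cons.mp hnd).1 (he ▸ hs')
      rw [PySem.Dict.get?_insert_of_ne _ _ hne]
      exact hnone s' (List.mem_cons_of_mem _ hs')
    simp only [pvModels, List.mem_append] at hm
    rcases hm with hm | hm
    · exact fun k v hkv => ih (a.insert s true) m hnd' (hnone' true) hm k v (step true _ _ hkv)
    · exact fun k v hkv => ih (a.insert s false) m hnd' (hnone' false) hm k v (step false _ _ hkv)

theorem pv_models_eq_product : ∀ (syms : List String) (a : PySem.Dict String Bool),
    syms.Nodup → (∀ s ∈ syms, a.contains s = false) →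
    pvModels syms a = (pvProduct syms.length).map (fun vs => PySem.Dict.update a (syms.zip vs)) := by
  intro syms
  induction syms with
  | nil => intro a _ _; simp [pvModels, pvProduct]; rfl
  | cons s r ih =>
    intro a hnd hfr
    have hnd' := (List.nodup_cons.mp hnd).2
    have hfr' : ∀ b : Bool, ∀ s' ∈ r, (a.insert s b).contains s' = false := by
      intro b s' hs'
      rw [PySem.Dict.contains_insert]
      have hne : s' ≠ s := fun he => (List.nodup_cons.mp hnd).1 (he ▸ hs')
      simp [hne, hfr s' (List.mem_cons_of_mem _ hs')]
    show pvModels r (a.insert s true) ++ pvModels r (a.insert s false) = _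
    rw [ih (a.insert s true) hnd' (hfr' true), ih (a.insert s false) hnd' (hfr' false)]
    simp only [List.length_cons, pvProduct, List.flatMap_cons, List.flatMap_nil, List.append_nil,
      List.map_append, List.map_map]
    congr 1

theorem pv_dfs_spec (cl : List (List String × String)) (q : String) :
    ∀ (syms : List String) (a : PySem.Dict String Bool),
    syms.Nodup → (∀ s ∈ syms, a.get? s = none) →
    (∀ pc ∈ cl, (pc.2 ∈ syms ∨ (a.get? pc.2).isSome) ∧ ∀ p ∈ pc.1, (p ∈ syms ∨ (a.get? p).isSome)) →
    pvDfs cl q syms a =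
      ((pvModels syms a).countP (fun m => cl.all (pvOk m)),
       (pvModels syms a).all (fun m => !cl.all (pvOk m) || m.getD q false)) := by
  intro syms
  induction syms with
  | nil =>
    intro a _ _ hcov
    have hcov' : ∀ pc ∈ cl, (a.get? pc.2).isSome ∧ ∀ p ∈ pc.1, (a.get? p).isSome := by
      intro pc hm
      obtain ⟨h1, h2⟩ := hcov pc hm
      refine ⟨h1.resolve_left (by simp), fun p hp => (h2 p hp).resolve_left (by simp)⟩
    by_cases hv : pvViolated cl a = true
    · have := pv_violated_eval cl a hv
      simp [pvDfs, hv, pvModels, this]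
    · have hv' : pvViolated cl a = false := Bool.not_eq_true _ ▸ (by simpa using hv)
      have := pv_leaf_eval cl a hcov' hv'
      simp [pvDfs, hv', pvModels, this]
  | cons s r ih =>
    intro a hnd hnone hcov
    have hnd' := (List.nodup_cons.mp hnd).2
    have hnone' : ∀ b : Bool, ∀ s' ∈ r, (a.insert s b).get? s' = none := by
      intro b s' hs'
      have hne : s' ≠ s := fun he => (List.nodup_cons.mp hnd).1 (he ▸ hs')
      rw [PySem.Dict.get?_insert_of_ne _ _ hne]
      exact hnone s' (List.mem_cons_of_mem _ hs')
    have hins : ∀ b : Bool, ∀ x : String, x ∈ s :: r ∨ (a.get? x).isSome →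
        x ∈ r ∨ ((a.insert s b).get? x).isSome := by
      intro b x hx
      rcases hx with hx | hx
      · rcases List.mem_cons.mp hx with he | hx'
        · right; subst he; simp [PySem.Dict.get?_insert_self]
        · left; exact hx'
      · right
        by_cases hxs : x = s
        · subst hxs; simp [PySem.Dict.get?_insert_self]
        · rw [PySem.Dict.get?_insert_of_ne _ _ hxs]; exact hx
    have hcov' : ∀ b : Bool, ∀ pc ∈ cl,
        (pc.2 ∈ r ∨ ((a.insert s b).get? pc.2).isSome) ∧
          ∀ p ∈ pc.1, (p ∈ r ∨ ((a.insert s b).get? p).isSome) := by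
      intro b pc hm
      obtain ⟨h1, h2⟩ := hcov pc hm
      exact ⟨hins b pc.2 h1, fun p hp => hins b p (h2 p hp)⟩
    by_cases hv : pvViolated cl a = true
    · have hall : ∀ m ∈ pvModels (s :: r) a, cl.all (pvOk m) = false := by
        intro m hm
        exact pv_violated_eval cl m
          (pv_violated_mono cl a m hv (pv_ext_models (s :: r) a m hnd hnone hm))
      simp only [pvDfs, hv, if_true]
      have h1 : List.countP (fun m => cl.all (pvOk m)) (pvModels (s :: r) a) = 0 :=
        List.countP_eq_zero.mpr (fun m hm => by simp [hall m hm])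
      have h2 : ((pvModels (s :: r) a).all fun m => !cl.all (pvOk m) || m.getD q false) = true :=
        List.all_eq_true.mpr (fun m hm => by simp [hall m hm])
      rw [h1, h2]
    · have hv' : pvViolated cl a = false := by simpa using hv
      simp only [pvDfs, hv', if_false, Bool.false_eq_true]
      rw [ih (a.insert s true) hnd' (hnone' true) (hcov' true),
          ih (a.insert s false) hnd' (hnone' false) (hcov' false)]
      show (_, _) = _
      simp [pvModels, List.countP_append, List.all_append]

theorem pv_foldA (C0 : List (List String × String)) (syms : List String) (q : String) :
    ∀ (tups : List (List Bool)) (L : List (PySem.Dict String Bool)) (b : Bool),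
    tups.foldl (pvLoopA C0 syms q) (L, b)
      = (L ++ ((tups.map (fun vs => PySem.Dict.ofList (syms.zip vs))).filter (fun m => pvEvalA m C0)),
         b && (tups.map (fun vs => PySem.Dict.ofList (syms.zip vs))).all
           (fun m => !(pvEvalA m C0) || m.getD q false)) := by
  intro tups
  induction tups with
  | nil => intro L b; simp
  | cons vs t ihr =>
    intro L b
    rw [List.foldl_cons]
    have hstep : pvLoopA C0 syms q (L, b) vs
        = (if pvEvalA (PySem.Dict.ofList (syms.zip vs)) C0 then
            (L ++ [PySem.Dict.ofList (syms.zip vs)],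
              if !((PySem.Dict.ofList (syms.zip vs)).getD q false) then false else b)
          else (L, b)) := rfl
    rw [hstep]
    cases he : pvEvalA (PySem.Dict.ofList (syms.zip vs)) C0
    · rw [if_neg (by simp [he]), ihr]
      simp [he]
    · rw [if_pos (by simp [he]), ihr]
      cases hq : (PySem.Dict.ofList (syms.zip vs)).getD q false <;> cases b <;> simp [he, hq]

theorem pv_ofList_eq_update (p : List (String × Bool)) :
    PySem.Dict.ofList p = PySem.Dict.update PySem.Dict.empty p := rfl

def pvSymsOf (kb : List String) : List String :=
  (kb.foldl pvStepA (PySem.Set.empty, [])).1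

def pvClausesOf (kb : List String) : List (List String × String) :=
  (kb.foldl pvStepA (PySem.Set.empty, [])).2

def pvCOf (kb : List String) : List (List String × String) :=
  (pvClausesOf kb).map pvNorm

def pvMOf (kb : List String) : List (PySem.Dict String Bool) :=
  pvModels (pvSymsOf kb) PySem.Dict.empty

def pvNOf (kb : List String) : Nat :=
  (pvMOf kb).countP (fun m => (pvCOf kb).all (pvOk m))

def pvFOf (kb : List String) (query : String) : Bool :=
  (pvMOf kb).all (fun m => !(pvCOf kb).all (pvOk m) || m.getD query false)

theorem pv_A_closed (kb : List String) (query : String) :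
    truth_table_check kb query =
      (if (true && pvFOf kb query)
            && !((pvMOf kb).filter (fun m => (pvCOf kb).all (pvOk m))).isEmpty
        then "YES: " ++ PySem.Int.toStr ((pvMOf kb).filter (fun m => (pvCOf kb).all (pvOk m))).length
        else "NO") := by
  simp only [truth_table_check, pvParseA]
  rw [pv_foldA]
  have hrel := pv_parse_rel kb PySem.Set.empty []
  simp only [List.map_nil] at hrel
  have hnd : ((kb.foldl pvStepA (PySem.Set.empty, ([] : List (List String × String)))).1).Nodup := by
    have h := pv_parse_nodup kb (PySem.Set.empty, ([] : List (List String × String)))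
      (by simp [PySem.Set.empty])
    rw [hrel] at h
    exact h
  have hmodels := pv_models_eq_product ((kb.foldl pvStepA (PySem.Set.empty, [])).1) PySem.Dict.empty hnd
      (by intro s _; simp [PySem.Dict.contains_empty])
  simp only [pv_ofList_eq_update, ← hmodels, List.nil_append]
  simp only [pv_evalA_eq]
  rfl

theorem pv_B_closed (kb : List String) (query : String) :
    truth_table_check_alt kb query =
      (if pvNOf kb > 0 && pvFOf kb query
        then "YES: " ++ PySem.Int.toStr (pvNOf kb) else "NO") := by
  simp only [truth_table_check_alt]
  have hrel := pv_parse_rel kb PySem.Set.empty []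
  simp only [List.map_nil] at hrel
  rw [hrel]
  have hnd : ((kb.foldl pvStepA (PySem.Set.empty, ([] : List (List String × String)))).1).Nodup := by
    have h := pv_parse_nodup kb (PySem.Set.empty, ([] : List (List String × String)))
      (by simp [PySem.Set.empty])
    rw [hrel] at h
    exact h
  have hcov := pv_parse_cover kb (PySem.Set.empty, ([] : List (List String × String)))
      (by intro pc hpc; simp at hpc)
  rw [hrel] at hcov
  have hdfs := pv_dfs_spec ((kb.foldl pvStepA (PySem.Set.empty, [])).2.map pvNorm) query
      (kb.foldl pvStepA (PySem.Set.empty, [])).1 PySem.Dict.empty hnd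
      (by intro s _; simp [PySem.Dict.get?_empty])
      (by intro pc hpc; obtain ⟨h1, h2⟩ := hcov pc hpc
          exact ⟨Or.inl h1, fun p hp => Or.inl (h2 p hp)⟩)
  simp only [hdfs]
  rfl

theorem pv_main : ∀ (kb : List String) (query : String),
    truth_table_check kb query = truth_table_check_alt kb query := by
  intro kb query
  rw [pv_A_closed, pv_B_closed]
  have hlen : ((pvMOf kb).filter (fun m => (pvCOf kb).all (pvOk m))).length = pvNOf kb :=
    (List.countP_eq_length_filter ..).symm
  by_cases hz : pvNOf kb = 0
  · have he : ((pvMOf kb).filter (fun m => (pvCOf kb).all (pvOk m))).isEmpty = true := by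
      rw [List.isEmpty_iff_length_eq_zero, hlen]; exact hz
    simp [he, hz]
  · have he : ((pvMOf kb).filter (fun m => (pvCOf kb).all (pvOk m))).isEmpty = false := by
      rw [Bool.eq_false_iff]
      intro hcon
      rw [List.isEmpty_iff_length_eq_zero, hlen] at hcon
      exact hz hcon
    have hpos : pvNOf kb > 0 := Nat.pos_of_ne_zero hz
    simp [he, hlen, hpos]

-- ===== VERDICT (by name: the statement is the Claim_ definition above) =====
theorem truth_table_check_spec : Claim_equal_truth_table_check := by
  intro kb query _ _
  show truth_table_check kb query = truth_table_check_alt kb query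
  exact pv_main kb query
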